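-- pv_equiv track=rewrite | github.com/mad462/QuickShakePic | tools/fix_bmp_bitdepth.py | snap_24bit_rows_to_palette
-- ===== SOURCE A (Python) =====
-- def nearest_palette_index(rgb: tuple[int, int, int], palette: list[tuple[int, int, int]]) -> int:
--     r, g, b = rgb
--     best_i = 0
--     best_d = 1 << 30
--     for i, (pr, pg, pb) in enumerate(palette):
--         d = (r - pr) ** 2 + (g - pg) ** 2 + (b - pb) ** 2
--         if d < best_d:
--             best_d = d
--             best_i = i
--     return best_i
--
-- def snap_24bit_rows_to_palette(
--     rows: list[list[int]], ref_palette: list[tuple[int, int, int]]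
-- ) -> list[list[int]]:
--     out: list[list[int]] = []
--     for row in rows:
--         out.append(
--             [
--                 nearest_palette_index(
--                     ((v >> 16) & 0xFF, (v >> 8) & 0xFF, v & 0xFF),
--                     ref_palette,
--                 )
--                 for v in row
--             ]
--         )
--     return out
-- ===== SOURCE B (Python) =====
-- def snap_24bit_rows_to_palette(
--     rows: list[list[int]], ref_palette: list[tuple[int, int, int]]
-- ) -> list[list[int]]:
--     # Decode all pixels once into one flat list, then do one pass per palette
--     # color over all pixels (palette as the OUTER loop), keeping best distance
--     # and best index arrays; finally reshape back into the row layout.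
--     pixels = [((v >> 16) & 0xFF, (v >> 8) & 0xFF, v & 0xFF) for row in rows for v in row]
--     n = len(pixels)
--     best_dist = [1 << 30] * n
--     best_index = [0] * n
--     for i, (pr, pg, pb) in enumerate(ref_palette):
--         for k, (r, g, b) in enumerate(pixels):
--             d = (r - pr) ** 2 + (g - pg) ** 2 + (b - pb) ** 2
--             if d < best_dist[k]:
--                 best_dist[k] = d
--                 best_index[k] = i
--     out: list[list[int]] = []
--     pos = 0
--     for row in rows:
--         out.append(best_index[pos:pos + len(row)])
--         pos += len(row)
--     return out
-- ===== Notes on version B (the rewrite author's own statement) =====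
-- stated objective: alternative
-- what changed: Per-pixel min scan over the palette is replaced by loop interchange: pixels are decoded once into a flat array, the palette is swept as the outer loop updating best-dist/best-index arrays for all pixels, and the flat index array is reshaped back into rows.
import Mathlib
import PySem

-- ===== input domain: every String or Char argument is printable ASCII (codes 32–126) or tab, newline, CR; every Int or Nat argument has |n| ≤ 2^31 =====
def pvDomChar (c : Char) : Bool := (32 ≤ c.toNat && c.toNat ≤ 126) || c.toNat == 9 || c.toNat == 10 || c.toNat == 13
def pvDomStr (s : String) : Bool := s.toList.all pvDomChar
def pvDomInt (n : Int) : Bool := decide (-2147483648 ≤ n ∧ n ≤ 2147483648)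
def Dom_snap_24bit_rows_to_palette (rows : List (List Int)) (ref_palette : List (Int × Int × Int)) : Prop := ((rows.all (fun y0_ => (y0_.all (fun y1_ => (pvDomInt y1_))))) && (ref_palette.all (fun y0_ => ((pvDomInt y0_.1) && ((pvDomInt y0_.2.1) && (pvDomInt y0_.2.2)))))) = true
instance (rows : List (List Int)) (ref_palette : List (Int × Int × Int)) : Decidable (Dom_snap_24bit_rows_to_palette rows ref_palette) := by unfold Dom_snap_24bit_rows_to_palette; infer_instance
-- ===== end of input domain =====

-- B replaces the per-pixel palette scan by a palette-outer sweep over flat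
-- best-dist/best-index state with a final reshape; same cost class (objective: alternative).

-- ===== PORT A =====
def nearest_palette_index (rgb : Int × Int × Int) (palette : List (Int × Int × Int)) : Int :=
  let st := (PySem.List.enumerate palette 0).foldl
    (fun (s : Int × Int) ip =>
      let d := (rgb.1 - ip.2.1) ^ 2 + (rgb.2.1 - ip.2.2.1) ^ 2 + (rgb.2.2 - ip.2.2.2) ^ 2
      if d < s.2 then (ip.1, d) else s)
    (0, (1 : Int) <<< 30)
  st.1

def snap_24bit_rows_to_palette (rows : List (List Int)) (ref_palette : List (Int × Int × Int)) : List (List Int) :=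
  rows.foldl
    (fun out row =>
      out ++ [row.map (fun (v : Int) =>
        nearest_palette_index
          (PySem.Int.band (v >>> 16) 255, PySem.Int.band (v >>> 8) 255, PySem.Int.band v 255)
          ref_palette)])
    []

-- ===== PORT B =====
-- pixel decode ((v>>16)&0xFF, (v>>8)&0xFF, v&0xFF)
def pvDecode (v : Int) : Int × Int × Int :=
  (PySem.Int.band (v >>> 16) 255, PySem.Int.band (v >>> 8) 255, PySem.Int.band v 255)

-- one palette entry (i,(pr,pg,pb)) applied to one pixel state (rgb, best_dist, best_index)
def pvUpdate (ip : Int × (Int × Int × Int)) (s : (Int × Int × Int) × Int × Int) :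
    (Int × Int × Int) × Int × Int :=
  let d := (s.1.1 - ip.2.1) ^ 2 + (s.1.2.1 - ip.2.2.1) ^ 2 + (s.1.2.2 - ip.2.2.2) ^ 2
  if d < s.2.1 then (s.1, d, ip.1) else s

-- reshape the flat best_index list back to the row-of-rows layout
def pvChop : List Nat → List Int → List (List Int)
  | [], _ => []
  | n :: ns, xs => xs.take n :: pvChop ns (xs.drop n)

def snap_24bit_rows_to_palette_alt (rows : List (List Int)) (ref_palette : List (Int × Int × Int)) : List (List Int) :=
  let pixels := rows.flatten.map pvDecode
  let init := pixels.map (fun p => (p, ((1 : Int) <<< 30, (0 : Int))))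
  let final := (PySem.List.enumerate ref_palette 0).foldl (fun sts ip => sts.map (pvUpdate ip)) init
  pvChop (rows.map List.length) (final.map (fun s => s.2.2))

-- ===== PRECONDITION & SPEC =====
def Spec_snap_24bit_rows_to_palette (rows : List (List Int)) (ref_palette : List (Int × Int × Int)) (out : List (List Int)) : Prop := out = snap_24bit_rows_to_palette_alt rows ref_palette
instance (rows : List (List Int)) (ref_palette : List (Int × Int × Int)) (out : List (List Int)) : Decidable (Spec_snap_24bit_rows_to_palette rows ref_palette out) := by unfold Spec_snap_24bit_rows_to_palette; infer_instance

-- ===== CLAIM (what is proved, stated in full; the proofs are below) =====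
def Claim_equal_snap_24bit_rows_to_palette : Prop := ∀ (rows : List (List Int)) (ref_palette : List (Int × Int × Int)), Dom_snap_24bit_rows_to_palette rows ref_palette → Spec_snap_24bit_rows_to_palette rows ref_palette (snap_24bit_rows_to_palette rows ref_palette)

-- ===== LEMMAS AND PROOFS =====

-- loop interchange: folding map-steps over a list equals mapping the per-element fold
theorem foldl_map_interchange {β σ : Type} (l : List β) (g : β → σ → σ) (sts : List σ) :
    l.foldl (fun sts p => sts.map (g p)) sts = sts.map (fun s => l.foldl (fun s p => g p s) s) := by
  induction l generalizing sts with
  | nil => simp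
  | cons p l ih => simp [List.foldl_cons, ih, List.map_map]

-- B's per-pixel fold carries the pixel unchanged and computes A's (index, dist) pair swapped
theorem pvUpdate_fold (l : List (Int × (Int × Int × Int))) (p : Int × Int × Int) (bd bi : Int) :
    l.foldl (fun s ip => pvUpdate ip s) (p, bd, bi)
      = (p,
         (l.foldl (fun (s : Int × Int) ip =>
            let d := (p.1 - ip.2.1) ^ 2 + (p.2.1 - ip.2.2.1) ^ 2 + (p.2.2 - ip.2.2.2) ^ 2
            if d < s.2 then (ip.1, d) else s) (bi, bd)).2,
         (l.foldl (fun (s : Int × Int) ip =>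
            let d := (p.1 - ip.2.1) ^ 2 + (p.2.1 - ip.2.2.1) ^ 2 + (p.2.2 - ip.2.2.2) ^ 2
            if d < s.2 then (ip.1, d) else s) (bi, bd)).1) := by
  induction l generalizing bd bi with
  | nil => rfl
  | cons ip l ih =>
      simp only [List.foldl_cons, pvUpdate]
      split_ifs <;> exact ih _ _

theorem chop_flatten_map {f : Int → Int} (xss : List (List Int)) :
    pvChop (xss.map List.length) (xss.flatten.map f) = xss.map (List.map f) := by
  induction xss with
  | nil => rfl
  | cons x xss ih =>
      simp only [List.map_cons, List.flatten_cons, List.map_append, pvChop]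
      rw [List.take_left' (by simp), List.drop_left' (by simp), ih]

theorem per_pixel (p : Int × Int × Int) (pal : List (Int × Int × Int)) :
    ((PySem.List.enumerate pal 0).foldl (fun s ip => pvUpdate ip s)
        (p, ((1 : Int) <<< 30, (0 : Int)))).2.2 = nearest_palette_index p pal := by
  rw [pvUpdate_fold]
  rfl

-- ===== VERDICT (by name: the statement is the Claim_ definition above) =====
theorem snap_24bit_rows_to_palette_spec : Claim_equal_snap_24bit_rows_to_palette := by
  intro rows pal _
  show _ = _
  simp only [snap_24bit_rows_to_palette, snap_24bit_rows_to_palette_alt,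
    PySem.List.foldl_append_singleton_eq_map, List.nil_append,
    foldl_map_interchange, List.map_map]
  rw [chop_flatten_map]
  simp only [Function.comp_def, per_pixel, pvDecode]
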